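-- pv_equiv track=rewrite | github.com/jampibryan/prueba-tecnica-algoritmos | codigo_ejemplo/ejercicio_01.py | calcular_tamanios_validos
-- ===== SOURCE A (Python) =====
-- def calcular_tamanios_validos(largo_min: int, largo_max: int, largo_peces: list) -> int:
--     """
--     Calcula la cantidad de tamaños válidos para el pez "Jhon".
--     Un tamaño válido es aquel que no pone a Jhon en peligro
--         ni permite que él coma a otros peces.
--     """
--     contador_tamanios_validos = 0
--
--     # Itera sobre todos los posibles tamaños para Jhon en el rango [largo_min, largo_max]
--     for tamanio_jhon in range(largo_min, largo_max + 1):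
--         tamanio_valido = True
--
--         # Verifica si hay conflictos de canibalismo contra otros peces
--         for tamanio_pez in largo_peces:
--             if (2 * tamanio_jhon <= tamanio_pez <= 10 * tamanio_jhon or
--                 2 * tamanio_pez <= tamanio_jhon <= 10 * tamanio_pez):
--                 tamanio_valido = False
--                 break
--
--         if tamanio_valido:
--             contador_tamanios_validos += 1
--
--     return contador_tamanios_validos
-- ===== SOURCE B (Python) =====
-- def calcular_tamanios_validos(largo_min: int, largo_max: int, largo_peces: list) -> int:
--     """Interval method: each fish p forbids sizes t with 2t<=p<=10t or 2p<=t<=10p,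
--     i.e. t in [ceil(p/10), p//2] or t in [2p, 10p]. Clip intervals to the range,
--     sort by left endpoint and sweep once, counting covered sizes; the answer is
--     the range length minus the covered count."""
--     ivs = []
--     for p in largo_peces:
--         ivs.append((max(-((-p) // 10), largo_min), min(p // 2, largo_max)))
--         ivs.append((max(2 * p, largo_min), min(10 * p, largo_max)))
--     ivs = [iv for iv in ivs if iv[0] <= iv[1]]
--     ivs.sort(key=lambda iv: iv[0])
--     total = max(0, largo_max - largo_min + 1)
--     cubierto = 0
--     cursor = largo_min
--     for a, b in ivs:
--         if b >= cursor:
--             cubierto += b - max(a, cursor) + 1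
--             cursor = b + 1
--     return total - cubierto
-- ===== Notes on version B (the rewrite author's own statement) =====
-- stated objective: alternative
-- what changed: Instead of testing every size in [largo_min, largo_max] against every fish, B derives the two forbidden intervals per fish ([ceil(p/10), p//2] and [2p, 10p]), clips them to the range, sorts them by left endpoint and sweeps once, returning the range length minus the covered count.
import Mathlib
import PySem

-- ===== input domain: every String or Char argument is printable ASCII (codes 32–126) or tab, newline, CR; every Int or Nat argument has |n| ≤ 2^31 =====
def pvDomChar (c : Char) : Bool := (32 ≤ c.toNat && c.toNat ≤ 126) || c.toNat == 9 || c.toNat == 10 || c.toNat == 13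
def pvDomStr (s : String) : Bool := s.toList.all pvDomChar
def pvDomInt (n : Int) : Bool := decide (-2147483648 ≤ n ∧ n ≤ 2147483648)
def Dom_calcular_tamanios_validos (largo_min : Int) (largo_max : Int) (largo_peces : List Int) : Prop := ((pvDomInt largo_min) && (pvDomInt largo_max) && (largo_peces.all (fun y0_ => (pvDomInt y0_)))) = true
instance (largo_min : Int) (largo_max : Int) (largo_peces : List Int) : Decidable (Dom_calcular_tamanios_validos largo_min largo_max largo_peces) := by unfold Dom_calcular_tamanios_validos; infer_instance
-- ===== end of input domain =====

-- B replaces A's size-by-size scan of the whole range by per-fish forbidden intervals,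
-- clipped to the range, sorted by left endpoint and swept once; its cost depends on the
-- number of fish instead of the range width (objective: alternative).

-- ===== PORT A =====
-- inner 'for tamanio_pez in largo_peces' loop with break: returns the final tamanio_valido
def pvCheckA (t : Int) : List Int → Bool
  | [] => true
  | p :: rest =>
      if (2 * t ≤ p ∧ p ≤ 10 * t) ∨ (2 * p ≤ t ∧ t ≤ 10 * p) then false
      else pvCheckA t rest

def calcular_tamanios_validos (largo_min : Int) (largo_max : Int) (largo_peces : List Int) : Int :=
  (PySem.List.pyRange largo_min (largo_max + 1) 1).foldl
    (fun acc t => if pvCheckA t largo_peces then acc + 1 else acc) 0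

-- ===== PORT B =====
-- the 'for p in largo_peces: ivs.append(..); ivs.append(..)' loop of Source B
def pvIntervalos (largo_min : Int) (largo_max : Int) (largo_peces : List Int) : List (Int × Int) :=
  largo_peces.foldl
    (fun acc p =>
      acc ++ [(max (-(PySem.Int.floordiv (-p) 10)) largo_min, min (PySem.Int.floordiv p 2) largo_max),
              (max (2 * p) largo_min, min (10 * p) largo_max)]) []

def calcular_tamanios_validos_alt (largo_min : Int) (largo_max : Int) (largo_peces : List Int) : Int :=
  let ivs := (pvIntervalos largo_min largo_max largo_peces).filter (fun iv => iv.1 ≤ iv.2)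
  let ivs' := PySem.List.sorted ivs (fun iv => iv.1) false
  let total := max 0 (largo_max - largo_min + 1)
  let res := ivs'.foldl
    (fun (st : Int × Int) iv =>
      if iv.2 ≥ st.2 then (st.1 + (iv.2 - max iv.1 st.2 + 1), iv.2 + 1) else st)
    (0, largo_min)
  total - res.1

-- ===== PRECONDITION & SPEC =====
def Spec_calcular_tamanios_validos (largo_min : Int) (largo_max : Int) (largo_peces : List Int) (out : Int) : Prop := out = calcular_tamanios_validos_alt largo_min largo_max largo_peces
instance (largo_min : Int) (largo_max : Int) (largo_peces : List Int) (out : Int) : Decidable (Spec_calcular_tamanios_validos largo_min largo_max largo_peces out) := by unfold Spec_calcular_tamanios_validos; infer_instance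

-- ===== CLAIM (what is proved, stated in full; the proofs are below) =====
def Claim_equal_calcular_tamanios_validos : Prop := ∀ (largo_min : Int) (largo_max : Int) (largo_peces : List Int), Dom_calcular_tamanios_validos largo_min largo_max largo_peces → Spec_calcular_tamanios_validos largo_min largo_max largo_peces (calcular_tamanios_validos largo_min largo_max largo_peces)

-- ===== LEMMAS AND PROOFS =====

-- the conflict test of A's inner 'if', as a predicate
def pvBad (p t : Int) : Prop := (2 * t ≤ p ∧ p ≤ 10 * t) ∨ (2 * p ≤ t ∧ t ≤ 10 * p)

-- the set of integers covered by a list of closed intervals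
noncomputable def pvCovSet : List (Int × Int) → Finset Int
  | [] => ∅
  | iv :: rest => Finset.Icc iv.1 iv.2 ∪ pvCovSet rest

theorem mem_pvCovSet (L : List (Int × Int)) (t : Int) :
    t ∈ pvCovSet L ↔ ∃ iv ∈ L, iv.1 ≤ t ∧ t ≤ iv.2 := by
  induction L with
  | nil => simp [pvCovSet]
  | cons iv rest ih => simp [pvCovSet, ih]

theorem pvCheckA_iff (t : Int) (L : List Int) :
    pvCheckA t L = true ↔ ∀ p ∈ L, ¬ pvBad p t := by
  induction L with
  | nil => simp [pvCheckA]
  | cons p rest ih =>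
      simp only [pvCheckA]
      by_cases h : (2 * t ≤ p ∧ p ≤ 10 * t) ∨ (2 * p ≤ t ∧ t ≤ 10 * p)
      · rw [if_pos h]
        simp only [Bool.false_eq_true, false_iff]
        intro hall
        exact (hall p List.mem_cons_self) h
      · rw [if_neg h, ih]
        constructor
        · intro hr q hq
          rcases List.mem_cons.mp hq with rfl | hq'
          · exact h
          · exact hr q hq'
        · intro hall q hq
          exact hall q (List.mem_cons_of_mem _ hq)

theorem foldl_count (p : Int → Bool) (L : List Int) (init : Int) :
    L.foldl (fun acc t => if p t then acc + 1 else acc) init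
      = init + (L.countP p : Int) := by
  induction L generalizing init with
  | nil => simp
  | cons x rest ih =>
      by_cases h : p x <;> simp [h, ih] <;> try ring

theorem countP_pyRange (p : Int → Bool) (a b : Int) :
    ((PySem.List.pyRange a b 1).countP p : Int)
      = (((Finset.Ico a b).filter (fun t => p t = true)).card : Int) := by
  generalize hk : (b - a).toNat = k
  induction k generalizing a with
  | zero =>
      rw [PySem.List.pyRange_one_eq_nil (by omega)]
      have he : Finset.Ico a b = ∅ := by ext t; simp [Finset.mem_Ico]; omega
      simp [he]
  | succ k ih =>
      have hab : a < b := by omega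
      rw [PySem.List.pyRange_one_cons hab]
      have hico : Finset.Ico a b = insert a (Finset.Ico (a + 1) b) := by
        ext t; simp [Finset.mem_Ico]; omega
      have hnm : a ∉ (Finset.Ico (a + 1) b).filter (fun t => p t = true) := by simp
      have hrec := ih (a + 1) (by omega)
      rw [List.countP_cons, hico, Finset.filter_insert]
      by_cases h : p a = true <;>
        simp [h, Finset.card_insert_of_notMem hnm, hrec]

-- the sweep of Source B computes the number of covered points ≥ cursor,
-- for a list of nonempty intervals sorted by left endpoint
theorem sweep_card (L : List (Int × Int)) (c0 cursor : Int)
    (hsort : L.Pairwise (fun x y => x.1 ≤ y.1))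
    (hne : ∀ iv ∈ L, iv.1 ≤ iv.2) :
    (L.foldl
      (fun (st : Int × Int) iv =>
        if iv.2 ≥ st.2 then (st.1 + (iv.2 - max iv.1 st.2 + 1), iv.2 + 1) else st)
      (c0, cursor)).1
      = c0 + (((pvCovSet L).filter (fun t => cursor ≤ t)).card : Int) := by
  induction L generalizing c0 cursor with
  | nil => simp [pvCovSet]
  | cons iv rest ih =>
      obtain ⟨a, b⟩ := iv
      have hhead : ∀ y ∈ rest, a ≤ y.1 := fun y hy => (List.pairwise_cons.mp hsort).1 y hy
      have hab : a ≤ b := hne (a, b) (by simp)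
      have hrest := (List.pairwise_cons.mp hsort).2
      have hnerest : ∀ x ∈ rest, x.1 ≤ x.2 := fun x hx => hne x (by simp [hx])
      by_cases hb : b ≥ cursor
      · simp only [List.foldl_cons, if_pos hb]
        rw [ih _ _ hrest hnerest]
        have hset : (pvCovSet ((a, b) :: rest)).filter (fun t => cursor ≤ t)
            = Finset.Icc (max a cursor) b ∪ (pvCovSet rest).filter (fun t => b + 1 ≤ t) := by
          ext t
          simp only [pvCovSet, Finset.mem_filter, Finset.mem_union, Finset.mem_Icc,
            mem_pvCovSet]
          constructor
          · rintro ⟨hc, hc2⟩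
            rcases hc with h | ⟨iv', hiv', hl1, hl2⟩
            · left; omega
            · by_cases ht : t ≤ b
              · have := hhead iv' hiv'; left; omega
              · right; exact ⟨⟨iv', hiv', hl1, hl2⟩, by omega⟩
          · rintro (h | ⟨⟨iv', hiv', hl1, hl2⟩, h3⟩)
            · exact ⟨Or.inl (by omega), by omega⟩
            · exact ⟨Or.inr ⟨iv', hiv', hl1, hl2⟩, by omega⟩
        rw [hset, Finset.card_union_of_disjoint]
        · rw [Int.card_Icc]
          push_cast
          omega
        · rw [Finset.disjoint_left]
          intro t ht1 ht2
          simp only [Finset.mem_Icc] at ht1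
          simp only [Finset.mem_filter] at ht2
          omega
      · simp only [List.foldl_cons, if_neg hb]
        rw [ih _ _ hrest hnerest]
        have hset : (pvCovSet ((a, b) :: rest)).filter (fun t => cursor ≤ t)
            = (pvCovSet rest).filter (fun t => cursor ≤ t) := by
          ext t
          simp only [pvCovSet, Finset.mem_filter, Finset.mem_union, Finset.mem_Icc]
          constructor
          · rintro ⟨h | h, hc⟩
            · omega
            · exact ⟨h, hc⟩
          · rintro ⟨h, hc⟩; exact ⟨Or.inr h, hc⟩
        rw [hset]

-- the raw intervals list is a flatMap
theorem pvIntervalos_eq (mn mx : Int) (L : List Int) :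
    pvIntervalos mn mx L
      = L.flatMap (fun p =>
          [(max (-(PySem.Int.floordiv (-p) 10)) mn, min (PySem.Int.floordiv p 2) mx),
           (max (2 * p) mn, min (10 * p) mx)]) := by
  unfold pvIntervalos
  rw [PySem.List.foldl_append_eq_flatMap]
  rw [List.nil_append]

-- for t inside the range, badness w.r.t. fish p is membership of p's clipped intervals
theorem bad_iff_mem (mn mx p t : Int) (h1 : mn ≤ t) (h2 : t ≤ mx) :
    pvBad p t ↔
      ((max (-(PySem.Int.floordiv (-p) 10)) mn ≤ t ∧ t ≤ min (PySem.Int.floordiv p 2) mx) ∨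
       (max (2 * p) mn ≤ t ∧ t ≤ min (10 * p) mx)) := by
  have e1 : (-(PySem.Int.floordiv (-p) 10) ≤ t) ↔ p ≤ 10 * t := by
    rw [neg_le, PySem.Int.le_floordiv_iff_mul_le (by omega : (0:Int) < 10)]
    omega
  have e2 : (t ≤ PySem.Int.floordiv p 2) ↔ 2 * t ≤ p := by
    rw [← not_lt, PySem.Int.floordiv_lt_iff_lt_mul (by omega : (0:Int) < 2)]
    omega
  unfold pvBad
  simp only [max_le_iff, le_min_iff]
  rw [e1, e2]
  omega

theorem calcular_tamanios_validos_eq : ∀ (mn mx : Int) (peces : List Int),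
    calcular_tamanios_validos mn mx peces = calcular_tamanios_validos_alt mn mx peces := by
  intro mn mx peces
  -- A side: count over the range
  unfold calcular_tamanios_validos
  rw [foldl_count, countP_pyRange]
  -- B side: unfold the lets
  show _ = (let ivs := (pvIntervalos mn mx peces).filter (fun iv => iv.1 ≤ iv.2)
    let ivs' := PySem.List.sorted ivs (fun iv => iv.1) false
    let total := max 0 (mx - mn + 1)
    let res := ivs'.foldl
      (fun (st : Int × Int) iv =>
        if iv.2 ≥ st.2 then (st.1 + (iv.2 - max iv.1 st.2 + 1), iv.2 + 1) else st)
      (0, mn)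
    total - res.1)
  simp only []
  set F := (pvIntervalos mn mx peces).filter (fun iv => iv.1 ≤ iv.2) with hF
  set S := PySem.List.sorted F (fun iv => iv.1) false with hS
  have hsort : S.Pairwise (fun x y => x.1 ≤ y.1) :=
    PySem.List.sorted_pairwise F (fun iv => iv.1)
  have hmemSF : ∀ iv, iv ∈ S ↔ iv ∈ F := fun iv =>
    (PySem.List.sorted_perm F (fun iv => iv.1) false).mem_iff
  have hne : ∀ iv ∈ S, iv.1 ≤ iv.2 := by
    intro iv hiv
    have := (hmemSF iv).mp hiv
    have := List.mem_filter.mp this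
    exact of_decide_eq_true this.2
  rw [sweep_card S 0 mn hsort hne]
  -- the covered points ≥ mn are exactly the conflicting sizes of the range
  have hset : (pvCovSet S).filter (fun t => mn ≤ t)
      = (Finset.Ico mn (mx + 1)).filter (fun t => ¬ pvCheckA t peces = true) := by
    ext t
    simp only [Finset.mem_filter, Finset.mem_Ico, mem_pvCovSet, pvCheckA_iff]
    push Not
    constructor
    · rintro ⟨⟨iv, hiv, hl1, hl2⟩, hmn⟩
      have hivF := (hmemSF iv).mp hiv
      have hivRaw := (List.mem_filter.mp hivF).1
      rw [pvIntervalos_eq] at hivRaw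
      simp only [List.mem_flatMap, List.mem_cons] at hivRaw
      obtain ⟨p, hp, hcase⟩ := hivRaw
      rcases hcase with h | h | h
      · subst h
        simp only [max_le_iff, le_min_iff] at hl1 hl2
        refine ⟨⟨hmn, by omega⟩, p, hp, ?_⟩
        rw [bad_iff_mem mn mx p t hmn (by omega)]
        left; constructor <;> simp only [max_le_iff, le_min_iff] <;> omega
      · subst h
        simp only [max_le_iff, le_min_iff] at hl1 hl2
        refine ⟨⟨hmn, by omega⟩, p, hp, ?_⟩
        rw [bad_iff_mem mn mx p t hmn (by omega)]
        right; constructor <;> simp only [max_le_iff, le_min_iff] <;> omega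
      · cases h
    · rintro ⟨⟨hmn, hmx⟩, p, hp, hbad⟩
      rw [bad_iff_mem mn mx p t hmn (by omega)] at hbad
      refine ⟨?_, hmn⟩
      rcases hbad with ⟨hl, hr⟩ | ⟨hl, hr⟩
      · refine ⟨(max (-(PySem.Int.floordiv (-p) 10)) mn, min (PySem.Int.floordiv p 2) mx),
          ?_, hl, hr⟩
        rw [hmemSF, hF, List.mem_filter, pvIntervalos_eq]
        constructor
        · simp only [List.mem_flatMap]
          exact ⟨p, hp, by simp⟩
        · simp only [decide_eq_true_eq]; omega
      · refine ⟨(max (2 * p) mn, min (10 * p) mx), ?_, hl, hr⟩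
        rw [hmemSF, hF, List.mem_filter, pvIntervalos_eq]
        constructor
        · simp only [List.mem_flatMap]
          exact ⟨p, hp, by simp⟩
        · simp only [decide_eq_true_eq]; omega
  rw [hset]
  have hsplit := Finset.card_filter_add_card_filter_not
    (s := Finset.Ico mn (mx + 1)) (p := fun t => pvCheckA t peces = true)
  have hcard : (Finset.Ico mn (mx + 1)).card = (mx + 1 - mn).toNat := Int.card_Ico mn (mx + 1)
  omega

-- ===== VERDICT (by name: the statement is the Claim_ definition above) =====
theorem calcular_tamanios_validos_spec : Claim_equal_calcular_tamanios_validos := by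
  intro mn mx peces _
  unfold Spec_calcular_tamanios_validos
  exact calcular_tamanios_validos_eq mn mx peces
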